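-- pv_equiv track=rewrite | github.com/fireprojectx/ciframusic | main.py | separar_cifras_letra
-- ===== SOURCE A (Python) =====
-- def separar_cifras_letra(cifra: str):
--     linhas_processadas = []
--     for linha in cifra.split('\n'):
--         cifra_linha = ""
--         letra_linha = ""
--         i = 0
--         while i < len(linha):
--             if linha[i] == '[':
--                 j = linha.find(']', i)
--                 if j != -1:
--                     acorde = linha[i:j+1]
--                     cifra_linha += acorde
--                     letra_linha += ' ' * (j + 1 - i)
--                     i = j + 1
--                 else:
--                     cifra_linha += linha[i]
--                     letra_linha += ' '
--                     i += 1
--             else: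
--                 cifra_linha += ' '
--                 letra_linha += linha[i]
--                 i += 1
--         linhas_processadas.append({"cifra": cifra_linha, "letra": letra_linha})
--     return linhas_processadas
-- ===== SOURCE B (Python) =====
-- def separar_cifras_letra(cifra: str):
--     def tokens(rest):
--         toks = []
--         while rest:
--             if rest[0] == '[' and ']' in rest:
--                 k = rest.index(']')
--                 toks.append(rest[:k + 1])
--                 rest = rest[k + 1:]
--             else:
--                 toks.append(rest[0])
--                 rest = rest[1:]
--         return toks
--
--     return [
--         {
--             "cifra": ''.join(t if t.startswith('[') else ' ' * len(t) for t in toks),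
--             "letra": ''.join(' ' * len(t) if t.startswith('[') else t for t in toks),
--         }
--         for toks in (tokens(linha) for linha in cifra.split('\n'))
--     ]
-- ===== Notes on version B (the rewrite author's own statement) =====
-- stated objective: alternative
-- what changed: B tokenizes each line into complete bracket groups and single characters by slicing off the front, then builds the chord and lyric tracks as two per-token maps joined at the end, instead of A's single index-based scan with find() and two growing accumulators.
import Mathlib
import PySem

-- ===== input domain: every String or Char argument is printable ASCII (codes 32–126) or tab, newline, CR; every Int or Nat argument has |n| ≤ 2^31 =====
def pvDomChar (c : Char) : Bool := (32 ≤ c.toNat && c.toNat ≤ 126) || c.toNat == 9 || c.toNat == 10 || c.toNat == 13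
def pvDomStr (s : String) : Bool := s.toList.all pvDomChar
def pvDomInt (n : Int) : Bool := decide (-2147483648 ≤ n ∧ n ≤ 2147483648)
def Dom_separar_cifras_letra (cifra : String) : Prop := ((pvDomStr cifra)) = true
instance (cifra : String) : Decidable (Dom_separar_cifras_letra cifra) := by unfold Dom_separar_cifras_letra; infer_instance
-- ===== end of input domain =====

-- B replaces A's manual index/find scan by a tokenizer (bracket groups / single chars) followed by two
-- per-token maps; objective: alternative decomposition of the same O(n) work.

-- ===== PORT A =====
-- A's inner while loop over index i; fuel = linha.length - i bounds the iteration count (totality only).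
def pvLoopA (cs : List Char) (fuel i : Nat) (cf lt : List Char) : List Char × List Char :=
  match fuel with
  | 0 => (cf, lt)
  | fuel + 1 =>
    if h : i < cs.length then
      if cs[i] = '[' then
        if PySem.Chars.findFrom cs [']'] (i : Int) ≠ -1 then
          pvLoopA cs fuel (PySem.Chars.findFrom cs [']'] (i : Int) + 1).toNat
            (cf ++ PySem.List.slice cs (some (i : Int)) (some (PySem.Chars.findFrom cs [']'] (i : Int) + 1)))
            (lt ++ List.replicate (PySem.Chars.findFrom cs [']'] (i : Int) + 1 - i).toNat ' ')
        else
          pvLoopA cs fuel (i + 1) (cf ++ [cs[i]]) (lt ++ [' '])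
      else
        pvLoopA cs fuel (i + 1) (cf ++ [' ']) (lt ++ [cs[i]])
    else (cf, lt)

def separar_cifras_letra (cifra : String) : List (List (String × String)) :=
  (PySem.Chars.splitOn cifra.toList ['\n']).foldl
    (fun acc linha =>
      let p := pvLoopA linha linha.length 0 [] []
      acc ++ [[("cifra", String.ofList p.1), ("letra", String.ofList p.2)]]) []

-- ===== PORT B =====
-- B's while loop slicing tokens off the front; fuel (totality only) = rest.length at the call.
-- rest.index(']') is ported as PySem.Chars.find (exact here: the guard guarantees ']' occurs).
def pvTokens (fuel : Nat) (rest : List Char) : List (List Char) :=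
  match fuel, rest with
  | 0, _ => []
  | _, [] => []
  | fuel + 1, c :: tl =>
    if c = '[' ∧ PySem.Chars.isIn [']'] (c :: tl) then
      PySem.List.slice (c :: tl) none (some (PySem.Chars.find (c :: tl) [']'] + 1)) ::
        pvTokens fuel (PySem.List.slice (c :: tl) (some (PySem.Chars.find (c :: tl) [']'] + 1)) none)
    else [c] :: pvTokens fuel tl

def pvCifTok (t : List Char) : List Char :=
  if PySem.Chars.startswith t ['['] then t else List.replicate t.length ' '

def pvLetTok (t : List Char) : List Char :=
  if PySem.Chars.startswith t ['['] then List.replicate t.length ' ' else t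

def separar_cifras_letra_alt (cifra : String) : List (List (String × String)) :=
  (PySem.Chars.splitOn cifra.toList ['\n']).map (fun linha =>
    let toks := pvTokens linha.length linha
    [("cifra", String.ofList (PySem.Chars.join [] (toks.map pvCifTok))),
     ("letra", String.ofList (PySem.Chars.join [] (toks.map pvLetTok)))])

-- ===== PRECONDITION & SPEC =====
def Spec_separar_cifras_letra (cifra : String) (out : List (List (String × String))) : Prop := out = separar_cifras_letra_alt cifra
instance (cifra : String) (out : List (List (String × String))) : Decidable (Spec_separar_cifras_letra cifra out) := by unfold Spec_separar_cifras_letra; infer_instance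

-- ===== CLAIM (what is proved, stated in full; the proofs are below) =====
def Claim_equal_separar_cifras_letra : Prop := ∀ (cifra : String), Dom_separar_cifras_letra cifra → Spec_separar_cifras_letra cifra (separar_cifras_letra cifra)

-- ===== LEMMAS AND PROOFS =====

lemma pv_join_nil_cons (t : List Char) (ts : List (List Char)) :
    PySem.Chars.join [] (t :: ts) = t ++ PySem.Chars.join [] ts := by
  cases ts <;> simp [PySem.Chars.join, List.intercalate, List.intersperse]

-- A's scan from index i produces exactly B's token contributions for the suffix cs.drop i.
lemma pv_key (cs : List Char) : ∀ (fuel i : Nat) (cf lt : List Char),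
    i ≤ cs.length → cs.length - i ≤ fuel →
    pvLoopA cs fuel i cf lt =
      (cf ++ PySem.Chars.join [] ((pvTokens fuel (cs.drop i)).map pvCifTok),
       lt ++ PySem.Chars.join [] ((pvTokens fuel (cs.drop i)).map pvLetTok)) := by
  intro fuel
  induction fuel with
  | zero =>
    intro i cf lt hle hf
    have hi : i = cs.length := by omega
    subst hi
    simp [pvLoopA, pvTokens, PySem.Chars.join, List.intercalate]
  | succ fuel ih =>
    intro i cf lt hle hf
    by_cases h : i < cs.length
    · have hdrop : cs.drop i = cs[i] :: cs.drop (i + 1) := List.drop_eq_getElem_cons h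
      by_cases hc : cs[i] = '['
      · by_cases hj : PySem.Chars.findFrom cs [']'] (i : Int) = -1
        · -- lone '[': no ']' in the rest of the line
          have hnin : ¬ ([']'] <:+: cs.drop i) :=
            (PySem.Chars.findFrom_natCast_eq_neg_one_iff cs [']'] i hle).1 hj
          have hisin : PySem.Chars.isIn [']'] (cs.drop i) = false := by
            rw [PySem.Chars.isIn_eq_false_iff]; exact hnin
          have hguard : ¬ (cs[i] = '[' ∧ PySem.Chars.isIn [']'] (cs[i] :: cs.drop (i + 1)) = true) := by
            rw [← hdrop]; intro hcon; rw [hisin] at hcon; exact absurd hcon.2 (by simp)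
          have hswt : PySem.Chars.startswith ['['] ['['] = true := by decide
          rw [pvLoopA]
          simp only [h, dite_true, hc, if_pos, hj, ite_not]
          rw [ih (i + 1) _ _ (by omega) (by omega)]
          rw [hdrop, pvTokens, if_neg hguard]
          simp [pv_join_nil_cons, pvCifTok, pvLetTok, hswt, hc]
        · -- matched bracket group
          have hfind : PySem.Chars.findFrom cs [']'] (i : Int) =
              if PySem.Chars.find (cs.drop i) [']'] = -1 then -1
              else (i : Int) + PySem.Chars.find (cs.drop i) [']'] :=
            PySem.Chars.findFrom_natCast cs [']'] i hle
          have hfne : PySem.Chars.find (cs.drop i) [']'] ≠ -1 := by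
            intro h0; rw [hfind, if_pos h0] at hj; exact hj rfl
          have hfge : 0 ≤ PySem.Chars.find (cs.drop i) [']'] := by
            have := PySem.Chars.neg_one_le_find (cs.drop i) [']']
            omega
          set k : Nat := (PySem.Chars.find (cs.drop i) [']']).toNat with hk
          have hkv : PySem.Chars.find (cs.drop i) [']'] = (k : Int) := by omega
          have hjv : PySem.Chars.findFrom cs [']'] (i : Int) = (i : Int) + (k : Int) := by
            rw [hfind, if_neg hfne, hkv]
          -- the ']' found lies inside the suffix: i + k < cs.length
          have hpre : [']'] <+: (cs.drop i).drop k := by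
            have := (PySem.Chars.find_spec (s := cs.drop i) (sub := [']']) hfge).1
            rwa [hkv, Int.toNat_natCast] at this
          have hklt : i + k < cs.length := by
            rcases hpre with ⟨r, hr⟩
            have hlen := congrArg List.length hr
            simp at hlen
            omega
          -- the guard of B holds
          have hisin : PySem.Chars.isIn [']'] (cs.drop i) = true := by
            rw [PySem.Chars.isIn_iff_infix]
            exact (PySem.Chars.find_ne_neg_one_iff (cs.drop i) [']']).1 hfne
          -- both token computations are take (k+1) of the suffix
          have hAtok : PySem.List.slice cs (some (i : Int)) (some (PySem.Chars.findFrom cs [']'] (i : Int) + 1)) =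
              (cs.drop i).take (k + 1) := by
            rw [hjv]
            have hcast : (i : Int) + (k : Int) + 1 = ((i + k + 1 : Nat) : Int) := by push_cast; ring
            rw [hcast, PySem.List.slice_natCast cs i (i + k + 1)]
            have : i + k + 1 - i = k + 1 := by omega
            rw [this]
          have hBtok : PySem.List.slice (cs.drop i) none (some (PySem.Chars.find (cs.drop i) [']'] + 1)) =
              (cs.drop i).take (k + 1) := by
            rw [hkv, PySem.List.slice_to (cs.drop i) (by omega)]
            have : ((k : Int) + 1).toNat = k + 1 := by omega
            rw [this]
          have hBrest : PySem.List.slice (cs.drop i) (some (PySem.Chars.find (cs.drop i) [']'] + 1)) none =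
              cs.drop (i + k + 1) := by
            rw [hkv, PySem.List.slice_from (cs.drop i) (by omega)]
            rw [List.drop_drop]
            have : ((k : Int) + 1).toNat = k + 1 := by omega
            rw [this]
            congr 1
          have htoklen : ((cs.drop i).take (k + 1)).length = k + 1 := by
            simp
            omega
          have hsw : PySem.Chars.startswith ((cs.drop i).take (k + 1)) ['['] = true := by
            rw [PySem.Chars.startswith_iff, hdrop, List.take_succ_cons, hc]
            exact ⟨_, rfl⟩
          rw [pvLoopA]
          simp only [h, dite_true, hc, if_pos, hj, ite_not]
          rw [ih ((PySem.Chars.findFrom cs [']'] (i : Int) + 1).toNat) _ _ (by rw [hjv]; omega) (by rw [hjv]; omega)]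
          have hi' : (PySem.Chars.findFrom cs [']'] (i : Int) + 1).toNat = i + k + 1 := by
            rw [hjv]; omega
          have hrep : (PySem.Chars.findFrom cs [']'] (i : Int) + 1 - (i : Int)).toNat = k + 1 := by
            rw [hjv]; omega
          rw [hi', hrep, hAtok]
          conv_rhs => rw [hdrop, pvTokens]
          have hg : cs[i] = '[' ∧ PySem.Chars.isIn [']'] (cs[i] :: cs.drop (i + 1)) = true := by
            refine ⟨hc, ?_⟩
            rw [← hdrop]; exact hisin
          rw [if_pos hg, ← hdrop, hBtok, hBrest]
          simp [pv_join_nil_cons, pvCifTok, pvLetTok, hsw, htoklen, List.append_assoc]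
      · -- ordinary lyric character
        have hguard : ¬ (cs[i] = '[' ∧ PySem.Chars.isIn [']'] (cs[i] :: cs.drop (i + 1)) = true) := by
          intro hcon; exact hc hcon.1
        have hsw : PySem.Chars.startswith [cs[i]] ['['] = false := by
          apply Bool.eq_false_iff.mpr
          intro hcon
          rcases (PySem.Chars.startswith_iff _ _).1 hcon with ⟨t, ht⟩
          rw [List.cons_append] at ht
          injection ht with h1 _
          exact hc h1.symm
        rw [pvLoopA]
        simp only [h, dite_true, if_neg hc]
        rw [ih (i + 1) _ _ (by omega) (by omega)]
        rw [hdrop, pvTokens, if_neg hguard]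
        simp [pv_join_nil_cons, pvCifTok, pvLetTok, hsw]
    · have hi : i = cs.length := by omega
      subst hi
      rw [pvLoopA]
      simp [pvTokens, PySem.Chars.join, List.intercalate]

-- ===== VERDICT (by name: the statement is the Claim_ definition above) =====
theorem separar_cifras_letra_spec : Claim_equal_separar_cifras_letra := by
  intro cifra _
  unfold Spec_separar_cifras_letra separar_cifras_letra separar_cifras_letra_alt
  rw [PySem.List.foldl_append_singleton_eq_map, List.nil_append]
  apply List.map_congr_left
  intro linha _
  have h := pv_key linha linha.length 0 [] [] (by omega) (by omega)
  simp only [List.drop_zero] at h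
  simp [h]
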